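-- pv_equiv track=rewrite | github.com/seemaullal/advent-of-code | 2025/01/solution.py | part_2
-- ===== SOURCE A (Python) =====
-- def part_2(instructions):
--     position = 50
--     result = 0
--     for rotation, distance in instructions:
--         if rotation == "L":
--             if position == 0:
--                 result += distance // 100
--             else:
--                 result += (distance + 100 - position) // 100
--             position = (position - distance) % 100
--         else:
--             result += (position + distance) // 100
--             position = (position + distance) % 100
--     return result
-- ===== SOURCE B (Python) =====
-- def _mult100(lo, hi):
--     # number of multiples of 100 in the half-open interval [lo, hi)
--     return (hi + 99) // 100 - (lo + 99) // 100
--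
--
-- def part_2(instructions):
--     # pass 1: materialise the absolute (unwrapped) trajectory as a prefix-sum list
--     trajectory = [50]
--     for rotation, distance in instructions:
--         step = -distance if rotation == "L" else distance
--         trajectory.append(trajectory[-1] + step)
--     # pass 2: count the multiples of 100 inside each traversed half-open interval
--     total = 0
--     for start, (rotation, distance) in zip(trajectory, instructions):
--         if rotation == "L":
--             total += _mult100(start - distance, start)
--         else:
--             total += _mult100(start + 1, start + distance + 1)
--     return total
-- ===== Notes on version B (the rewrite author's own statement) =====
-- stated objective: alternative
-- what changed: B is two staged passes: it first materialises the absolute (unwrapped) trajectory as a prefix-sum list, then zips it with the instructions and sums the number of multiples of 100 inside each traversed half-open interval via a generic interval-counting helper, eliminating A's single-pass wrapped position mod 100 and its position==0 special case.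
import Mathlib
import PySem

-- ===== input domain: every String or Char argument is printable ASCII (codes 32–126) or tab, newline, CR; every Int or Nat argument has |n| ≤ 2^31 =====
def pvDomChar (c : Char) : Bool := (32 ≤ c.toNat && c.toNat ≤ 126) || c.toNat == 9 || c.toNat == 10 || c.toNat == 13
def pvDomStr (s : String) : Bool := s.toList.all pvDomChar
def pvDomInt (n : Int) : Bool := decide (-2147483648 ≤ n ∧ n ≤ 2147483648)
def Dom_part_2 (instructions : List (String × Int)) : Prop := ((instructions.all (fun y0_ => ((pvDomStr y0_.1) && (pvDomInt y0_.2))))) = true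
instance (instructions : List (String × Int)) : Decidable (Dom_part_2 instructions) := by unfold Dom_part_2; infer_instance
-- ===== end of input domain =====

-- B replaces A's single pass over a position wrapped into [0,100) by two staged passes:
-- materialise the absolute trajectory as a prefix-sum list, then count multiples of 100
-- inside each traversed interval (objective: alternative decomposition, same cost).

-- ===== PORT A =====
-- literal transliteration of A: state (position, result), wrap with Python `%`
def part_2 (instructions : List (String × Int)) : Int :=
  (instructions.foldl
    (fun (st : Int × Int) pr =>
      let position := st.1
      let result := st.2
      let rotation := pr.1
      let distance := pr.2
      if rotation = "L" then
        let result :=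
          if position = 0 then result + PySem.Int.floordiv distance 100
          else result + PySem.Int.floordiv (distance + 100 - position) 100
        (PySem.Int.mod (position - distance) 100, result)
      else
        (PySem.Int.mod (position + distance) 100,
         result + PySem.Int.floordiv (position + distance) 100))
    (50, 0)).2

-- ===== PORT B =====
-- helper _mult100 from Source B: multiples of 100 in the half-open interval [lo, hi)
def pvMult100 (lo hi : Int) : Int :=
  PySem.Int.floordiv (hi + 99) 100 - PySem.Int.floordiv (lo + 99) 100

-- pass 1 of Source B: trajectory list built by appending positions[-1] + step
def pvTrajFold (instructions : List (String × Int)) : List Int :=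
  (instructions.foldl
    (fun (st : Int × List Int) pr =>
      let step := if pr.1 = "L" then -pr.2 else pr.2
      let a := st.1 + step
      (a, st.2 ++ [a]))
    (50, [50])).2

def part_2_alt (instructions : List (String × Int)) : Int :=
  -- pass 2 of Source B: zip the trajectory with the instructions and sum interval counts
  ((pvTrajFold instructions).zip instructions).foldl
    (fun total se =>
      let start := se.1
      let rotation := se.2.1
      let distance := se.2.2
      if rotation = "L" then total + pvMult100 (start - distance) start
      else total + pvMult100 (start + 1) (start + distance + 1))
    0

-- ===== PRECONDITION & SPEC =====
def Spec_part_2 (instructions : List (String × Int)) (out : Int) : Prop := out = part_2_alt instructions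
instance (instructions : List (String × Int)) (out : Int) : Decidable (Spec_part_2 instructions out) := by unfold Spec_part_2; infer_instance

-- ===== CLAIM (what is proved, stated in full; the proofs are below) =====
def Claim_equal_part_2 : Prop := ∀ (instructions : List (String × Int)), Dom_part_2 instructions → Spec_part_2 instructions (part_2 instructions)

-- ===== LEMMAS AND PROOFS =====

-- proof-only helper: the tail of the trajectory as a structural recursion
def pvTrajRec (a : Int) : List (String × Int) → List Int
  | [] => []
  | pr :: rest =>
      let a' := if pr.1 = "L" then a - pr.2 else a + pr.2
      a' :: pvTrajRec a' rest

theorem pvTrajFold_acc (instructions : List (String × Int)) (a : Int) (acc : List Int) :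
    (instructions.foldl
      (fun (st : Int × List Int) pr =>
        let step := if pr.1 = "L" then -pr.2 else pr.2
        let a := st.1 + step
        (a, st.2 ++ [a]))
      (a, acc)).2 = acc ++ pvTrajRec a instructions := by
  induction instructions generalizing a acc with
  | nil => simp [pvTrajRec]
  | cons pr rest ih =>
    obtain ⟨r, d⟩ := pr
    simp only [List.foldl_cons, pvTrajRec, ih, List.append_assoc]
    by_cases hL : r = "L" <;> simp [hL, sub_eq_add_neg]

-- core invariant: B's second pass over (a :: trajectory-from-a) equals A's fold from (a % 100, r)
theorem part_2_zip_agree (instructions : List (String × Int)) (r a : Int) :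
    ((a :: pvTrajRec a instructions).zip instructions).foldl
      (fun total se =>
        let start := se.1
        let rotation := se.2.1
        let distance := se.2.2
        if rotation = "L" then total + pvMult100 (start - distance) start
        else total + pvMult100 (start + 1) (start + distance + 1))
      r
    =
    (instructions.foldl
      (fun (st : Int × Int) pr =>
        let position := st.1
        let result := st.2
        let rotation := pr.1
        let distance := pr.2
        if rotation = "L" then
          let result :=
            if position = 0 then result + PySem.Int.floordiv distance 100
            else result + PySem.Int.floordiv (distance + 100 - position) 100
          (PySem.Int.mod (position - distance) 100, result)
        else
          (PySem.Int.mod (position + distance) 100,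
           result + PySem.Int.floordiv (position + distance) 100))
      (PySem.Int.mod a 100, r)).2 := by
  induction instructions generalizing r a with
  | nil => rfl
  | cons pr rest ih =>
    obtain ⟨rot, d⟩ := pr
    have m100 : ∀ x : Int, PySem.Int.mod x 100 = x % 100 :=
      fun x => PySem.Int.mod_eq_emod_of_pos (by norm_num)
    have f100 : ∀ x : Int, PySem.Int.floordiv x 100 = x / 100 :=
      fun x => PySem.Int.floordiv_eq_ediv_of_pos (by norm_num)
    simp only [pvTrajRec, List.zip_cons_cons, List.foldl_cons, pvMult100]
    by_cases hL : rot = "L"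
    · simp only [hL, if_true]
      have hmod : PySem.Int.mod (PySem.Int.mod a 100 - d) 100 = PySem.Int.mod (a - d) 100 := by
        simp only [m100]; omega
      by_cases h0 : PySem.Int.mod a 100 = 0
      · rw [if_pos h0, hmod]
        have key : r + (PySem.Int.floordiv (a + 99) 100 - PySem.Int.floordiv (a - d + 99) 100)
            = r + PySem.Int.floordiv d 100 := by
          rw [m100] at h0; simp only [f100]; omega
        rw [← ih (r + _) (a - d), key]; rfl
      · rw [if_neg h0, hmod]
        have key : r + (PySem.Int.floordiv (a + 99) 100 - PySem.Int.floordiv (a - d + 99) 100)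
            = r + PySem.Int.floordiv (d + 100 - PySem.Int.mod a 100) 100 := by
          rw [m100] at h0 ⊢; simp only [f100]; omega
        rw [← ih (r + _) (a - d), key]; rfl
    · simp only [hL, if_false]
      have hmod : PySem.Int.mod (PySem.Int.mod a 100 + d) 100 = PySem.Int.mod (a + d) 100 := by
        simp only [m100]; omega
      rw [hmod]
      have key : r + (PySem.Int.floordiv (a + d + 1 + 99) 100 - PySem.Int.floordiv (a + 1 + 99) 100)
          = r + PySem.Int.floordiv (PySem.Int.mod a 100 + d) 100 := by
        simp only [m100, f100]; omega
      rw [← ih (r + _) (a + d), key]; rfl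

-- ===== VERDICT (by name: the statement is the Claim_ definition above) =====
theorem part_2_spec : Claim_equal_part_2 := by
  intro instructions _
  unfold Spec_part_2 part_2 part_2_alt pvTrajFold
  rw [pvTrajFold_acc instructions 50 [50], List.singleton_append]
  have h := part_2_zip_agree instructions 0 50
  have h50 : PySem.Int.mod (50 : Int) 100 = 50 := by decide
  rw [h50] at h
  exact h.symm
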